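-- pv_equiv track=rewrite | github.com/ogg-lab/LineMonsterFirm-MatchingTool-WebVer | lib/process_data.py | precalc_affinity_cpg2
-- ===== SOURCE A (Python) =====
-- def precalc_affinity_cpg2(lis_affinities_cp):
--
--     # 子×親 + min(子×祖父, 親×祖父) + min(子×祖母, 親×祖母)の値を格納した4次元テーブル作成。
--     # dim1：祖母、dim2：祖父、dim3：親、dim4:子
--
--     # 3次元、4次元リスト作成
--     length = len(lis_affinities_cp)
--     work = [[[0 for i in range(length)] for j in range(length)] for k in range(length)]
--     lis_affinities_cpg = [[[[0 for i in range(length)] for j in range(length)] for k in range(length)] for l in range(length)]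
--
--     # 計算…min(子×祖父, 親×祖父)参照用テーブル
--     for child in range(length):
--         for parent in range(length):
--             for grand in range(length):
--                 cg = lis_affinities_cp[child][grand]
--                 pg = lis_affinities_cp[parent][grand]
--                 work[child][parent][grand] = cg if cg < pg else pg
--
--     # 実テーブル
--     for child in range(length):
--         for parent in range(length):
--             cp = lis_affinities_cp[child][parent]
--             for granpa in range(length):
--                 for granma in range(length):
--                     lis_affinities_cpg[parent][granpa][granma][child] = work[child][parent][granpa] + work[child][parent][granma] + cp
--
--     return lis_affinities_cpg
-- ===== SOURCE B (Python) =====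
-- def precalc_affinity_cpg2(lis_affinities_cp):
--     # Same 4D table, built in one direct comprehension: no intermediate 3D
--     # `work` table and no mutation; each entry is computed in place as
--     # min(child x granpa, parent x granpa) + min(child x granma, parent x granma) + child x parent.
--     n = len(lis_affinities_cp)
--     return [[[[min(lis_affinities_cp[c][gpa], lis_affinities_cp[p][gpa])
--                + min(lis_affinities_cp[c][gma], lis_affinities_cp[p][gma])
--                + lis_affinities_cp[c][p]
--                for c in range(n)]
--               for gma in range(n)]
--              for gpa in range(n)]
--             for p in range(n)]
-- ===== Notes on version B (the rewrite author's own statement) =====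
-- stated objective: simpler
-- what changed: Drops the preallocated zero tables, the precomputed 3D min-table `work` and all in-place index assignments; builds the 4D result directly as one nested comprehension computing each entry in closed form.
import Mathlib
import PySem

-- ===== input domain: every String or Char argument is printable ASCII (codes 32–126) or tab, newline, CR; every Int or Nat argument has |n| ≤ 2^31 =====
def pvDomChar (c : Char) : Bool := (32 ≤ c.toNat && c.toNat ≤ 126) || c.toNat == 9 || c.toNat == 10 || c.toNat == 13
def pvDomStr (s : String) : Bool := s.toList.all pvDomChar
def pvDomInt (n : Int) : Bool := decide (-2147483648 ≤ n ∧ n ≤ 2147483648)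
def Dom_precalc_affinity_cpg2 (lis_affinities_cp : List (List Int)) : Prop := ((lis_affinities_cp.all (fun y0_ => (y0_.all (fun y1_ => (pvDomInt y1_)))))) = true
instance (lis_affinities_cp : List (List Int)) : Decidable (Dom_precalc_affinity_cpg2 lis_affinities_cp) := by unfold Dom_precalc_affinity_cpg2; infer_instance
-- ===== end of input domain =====

-- B drops A's intermediate 3D `work` table and all in-place assignments and builds the 4D
-- table directly as one nested comprehension (objective: simpler).

-- ===== PORT A =====
-- Loop indices come from range(length), so they are Nats with i < length; `List.getD` with
-- default is exact Python indexing whenever the index is in range — under Pre_ every index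
-- used here is in range, so the defaults are never read.  In-place assignment
-- t[i][j]… = v is ported as nested List.modify / List.set at the same indices.
def precalc_affinity_cpg2 (lis_affinities_cp : List (List Int)) : List (List (List (List Int))) :=
  let length := lis_affinities_cp.length
  let work : List (List (List Int)) :=
    (List.range length).map (fun _k =>
      (List.range length).map (fun _j =>
        (List.range length).map (fun _i => (0 : Int))))
  let lis_affinities_cpg : List (List (List (List Int))) :=
    (List.range length).map (fun _l =>
      (List.range length).map (fun _k =>
        (List.range length).map (fun _j =>
          (List.range length).map (fun _i => (0 : Int)))))
  let work :=
    (List.range length).foldl (fun w child =>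
      (List.range length).foldl (fun w parent =>
        (List.range length).foldl (fun w grand =>
          let cg := (lis_affinities_cp.getD child []).getD grand 0
          let pg := (lis_affinities_cp.getD parent []).getD grand 0
          w.modify child (fun w2 => w2.modify parent (fun w1 =>
            w1.set grand (if cg < pg then cg else pg)))) w) w) work
  (List.range length).foldl (fun t child =>
    (List.range length).foldl (fun t parent =>
      let cp := (lis_affinities_cp.getD child []).getD parent 0
      (List.range length).foldl (fun t granpa =>
        (List.range length).foldl (fun t granma =>
          t.modify parent (fun l3 => l3.modify granpa (fun l2 => l2.modify granma (fun l1 =>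
            l1.set child (((work.getD child []).getD parent []).getD granpa 0
              + ((work.getD child []).getD parent []).getD granma 0 + cp))))) t) t) t)
    lis_affinities_cpg

-- ===== PORT B =====
def precalc_affinity_cpg2_alt (lis_affinities_cp : List (List Int)) : List (List (List (List Int))) :=
  let n := lis_affinities_cp.length
  (List.range n).map (fun p =>
    (List.range n).map (fun gpa =>
      (List.range n).map (fun gma =>
        (List.range n).map (fun c =>
          min ((lis_affinities_cp.getD c []).getD gpa 0) ((lis_affinities_cp.getD p []).getD gpa 0)
          + min ((lis_affinities_cp.getD c []).getD gma 0) ((lis_affinities_cp.getD p []).getD gma 0)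
          + (lis_affinities_cp.getD c []).getD p 0))))

-- ===== PRECONDITION & SPEC =====
-- Pre_ excludes exactly the inputs where the Python A raises IndexError: a row shorter than
-- the outer list makes lis_affinities_cp[child][grand] fail for some grand < length.
def Pre_precalc_affinity_cpg2 (lis_affinities_cp : List (List Int)) : Prop :=
  ∀ row ∈ lis_affinities_cp, lis_affinities_cp.length ≤ row.length
instance (lis_affinities_cp : List (List Int)) : Decidable (Pre_precalc_affinity_cpg2 lis_affinities_cp) := by unfold Pre_precalc_affinity_cpg2; infer_instance

def pvWitness_precalc_affinity_cpg2 : List (List Int) := [[1, 2], [3, 4]]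

def Spec_precalc_affinity_cpg2 (lis_affinities_cp : List (List Int)) (out : List (List (List (List Int)))) : Prop := out = precalc_affinity_cpg2_alt lis_affinities_cp
instance (lis_affinities_cp : List (List Int)) (out : List (List (List (List Int)))) : Decidable (Spec_precalc_affinity_cpg2 lis_affinities_cp out) := by unfold Spec_precalc_affinity_cpg2; infer_instance

-- ===== CLAIM (what is proved, stated in full; the proofs are below) =====
def Claim_equal_precalc_affinity_cpg2 : Prop := ∀ (lis_affinities_cp : List (List Int)), Dom_precalc_affinity_cpg2 lis_affinities_cp → Pre_precalc_affinity_cpg2 lis_affinities_cp → Spec_precalc_affinity_cpg2 lis_affinities_cp (precalc_affinity_cpg2 lis_affinities_cp)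

-- ===== LEMMAS AND PROOFS =====

theorem mapIdx_map_range {α β : Type} (n : Nat) (g : Nat → α) (F : Nat → α → β) :
    ((List.range n).map g).mapIdx F = (List.range n).map (fun i => F i (g i)) := by
  apply List.ext_getElem
  · simp
  · intro i h1 h2
    simp [List.getElem_mapIdx]

theorem set_map_range {α : Type} (n : Nat) (g : Nat → α) (c : Nat) (v : α) (hc : c < n) :
    ((List.range n).map g).set c v = (List.range n).map (fun i => if i = c then v else g i) := by
  apply List.ext_getElem
  · simp
  · intro i h1 h2
    by_cases hic : i = c
    · subst hic; simp
    · simp [List.getElem_set, hic]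
      intro h; exact (hic h.symm).elim

theorem foldl_modify_fixed {α γ : Type} (l : List γ) (i : Nat) (F : γ → List α → List α)
    (w : List (List α)) :
    l.foldl (fun acc x => acc.modify i (F x)) w
      = w.modify i (fun r => l.foldl (fun r x => F x r) r) := by
  induction l generalizing w with
  | nil =>
      simp only [List.foldl_nil]
      apply List.ext_getElem <;> simp [List.getElem_modify]
  | cons x t ih =>
      simp only [List.foldl_cons, ih, List.modify_modify_eq]
      rfl

theorem foldl_modify_range_aux {α : Type} (F : Nat → α → α) (init : List α) (k : Nat)
    (hk : k ≤ init.length) :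
    (List.range k).foldl (fun acc i => acc.modify i (F i)) init
      = init.mapIdx (fun i x => if i < k then F i x else x) := by
  induction k with
  | zero =>
      simp only [List.range_zero, List.foldl_nil]
      apply List.ext_getElem <;> simp [List.getElem_mapIdx]
  | succ k ih =>
      rw [List.range_succ, List.foldl_append, ih (Nat.le_of_succ_le hk)]
      apply List.ext_getElem
      · simp
      · intro i h1 h2
        simp only [List.foldl_cons, List.foldl_nil]
        rw [List.getElem_modify]
        by_cases hik : k = i
        · subst hik
          simp [List.getElem_mapIdx]
        · simp only [hik, if_false, List.getElem_mapIdx]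
          by_cases h3 : i < k
          · simp [h3, Nat.lt_succ_of_lt h3]
          · have h4 : ¬ i < k + 1 := by omega
            simp [h3, h4]

theorem foldl_modify_range_n {α : Type} (F : Nat → α → α) (init : List α) (n : Nat)
    (h : init.length = n) :
    (List.range n).foldl (fun acc i => acc.modify i (F i)) init
      = init.mapIdx (fun i x => F i x) := by
  subst h
  rw [foldl_modify_range_aux F init init.length (Nat.le_refl _)]
  apply List.ext_getElem
  · simp
  · intro i h1 h2
    have : i < init.length := by simpa using h1
    simp [List.getElem_mapIdx, this]

theorem foldl_set_range_aux {α : Type} (f : Nat → α) (init : List α) (k : Nat)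
    (hk : k ≤ init.length) :
    (List.range k).foldl (fun acc i => acc.set i (f i)) init
      = init.mapIdx (fun i x => if i < k then f i else x) := by
  induction k with
  | zero =>
      simp only [List.range_zero, List.foldl_nil]
      apply List.ext_getElem <;> simp [List.getElem_mapIdx]
  | succ k ih =>
      rw [List.range_succ, List.foldl_append, ih (Nat.le_of_succ_le hk)]
      apply List.ext_getElem
      · simp
      · intro i h1 h2
        simp only [List.foldl_cons, List.foldl_nil]
        rw [List.getElem_set]
        by_cases hik : k = i
        · subst hik
          simp [List.getElem_mapIdx]
        · simp only [hik, if_false, List.getElem_mapIdx]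
          by_cases h3 : i < k
          · simp [h3, Nat.lt_succ_of_lt h3]
          · have h4 : ¬ i < k + 1 := by omega
            simp [h3, h4]

theorem foldl_set_range_n {α : Type} (f : Nat → α) (init : List α) (n : Nat)
    (h : init.length = n) :
    (List.range n).foldl (fun acc i => acc.set i (f i)) init = (List.range n).map f := by
  subst h
  rw [foldl_set_range_aux f init init.length (Nat.le_refl _)]
  apply List.ext_getElem
  · simp
  · intro i h1 h2
    have : i < init.length := by simpa using h1
    simp [List.getElem_mapIdx, this]

theorem getD_map_range {α : Type} (n : Nat) (f : Nat → α) (c : Nat) (d : α) (hc : c < n) :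
    ((List.range n).map f).getD c d = f c := by
  rw [List.getD_eq_getElem?_getD]
  simp [hc]

theorem child_fold (n : Nat) (V : Nat → Nat → Nat → Nat → Int) (k : Nat) (hk : k ≤ n) :
    (List.range k).foldl (fun t child =>
       (List.range n).foldl (fun t parent =>
          t.modify parent (fun l3 =>
            (List.range n).foldl (fun l3 granpa =>
               l3.modify granpa (fun l2 =>
                 (List.range n).foldl (fun l2 granma =>
                    l2.modify granma (fun l1 =>
                      l1.set child (V child parent granpa granma))) l2)) l3)) t)
       ((List.range n).map (fun _ => (List.range n).map (fun _ =>
          (List.range n).map (fun _ => (List.range n).map (fun _ => (0:Int))))))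
    = (List.range n).map (fun p => (List.range n).map (fun gpa =>
        (List.range n).map (fun gma => (List.range n).map (fun c =>
          if c < k then V c p gpa gma else 0)))) := by
  induction k with
  | zero => simp
  | succ k ih =>
      rw [List.range_succ, List.foldl_append, ih (Nat.le_of_succ_le hk)]
      simp only [List.foldl_cons, List.foldl_nil]
      have hkn : k < n := hk
      simp only [foldl_modify_range_n, mapIdx_map_range,
        List.length_map, List.length_range,
        set_map_range (n := n) (c := k) (hc := hkn)]
      simp only [List.map_inj_left, List.mem_range]
      intro p hp gpa hgpa gma hgma c hc
      by_cases h1 : c = k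
      · subst h1; simp
      · by_cases h2 : c < k <;> simp [h1, h2] <;> omega

-- ===== VERDICT (by name: the statement is the Claim_ definition above) =====
theorem precalc_affinity_cpg2_spec : Claim_equal_precalc_affinity_cpg2 := by
  intro cp _ _
  unfold Spec_precalc_affinity_cpg2 precalc_affinity_cpg2 precalc_affinity_cpg2_alt
  simp only [foldl_modify_fixed]
  simp only [foldl_modify_range_n, foldl_set_range_n, mapIdx_map_range,
    List.length_map, List.length_range]
  rw [child_fold cp.length _ cp.length (Nat.le_refl _)]
  simp only [List.map_inj_left, List.mem_range]
  intro p hp gpa hgpa gma hgma c hc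
  simp only [hc, if_true, getD_map_range _ _ _ _ hc, getD_map_range _ _ _ _ hp,
    getD_map_range _ _ _ _ hgpa, getD_map_range _ _ _ _ hgma]
  simp only [min_def]
  split_ifs <;> omega
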